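-- pv_equiv track=rewrite | github.com/Elvich/Algorithms-and-data-structures | Term 2/Para 28.04.2025/Three.py | find_extreme_in_stack
-- ===== SOURCE A (Python) =====
-- def find_extreme_in_stack(stack, find_max):
--     temp_stack = []
--     extreme_value = None
--
--     while stack:
--         element = stack.pop()
--         if extreme_value is None or (find_max and element > extreme_value) or (not find_max and element < extreme_value):
--             extreme_value = element
--         temp_stack.append(element)
--
--     while temp_stack:
--         stack.append(temp_stack.pop())
--
--     return extreme_value
-- ===== SOURCE B (Python) =====
-- def find_extreme_in_stack(stack, find_max):
--     # Non-destructive: the stack's net content is unchanged by A, so just read it.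
--     if not stack:
--         return None
--     return max(stack) if find_max else min(stack)
-- ===== Notes on version B (the rewrite author's own statement) =====
-- stated objective: simpler
-- what changed: Replaces the destructive pop-everything/compare/push-back two-loop routine with a direct non-mutating max()/min() read of the list (A restores the stack, so its net effect on the argument is none).
import Mathlib
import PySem

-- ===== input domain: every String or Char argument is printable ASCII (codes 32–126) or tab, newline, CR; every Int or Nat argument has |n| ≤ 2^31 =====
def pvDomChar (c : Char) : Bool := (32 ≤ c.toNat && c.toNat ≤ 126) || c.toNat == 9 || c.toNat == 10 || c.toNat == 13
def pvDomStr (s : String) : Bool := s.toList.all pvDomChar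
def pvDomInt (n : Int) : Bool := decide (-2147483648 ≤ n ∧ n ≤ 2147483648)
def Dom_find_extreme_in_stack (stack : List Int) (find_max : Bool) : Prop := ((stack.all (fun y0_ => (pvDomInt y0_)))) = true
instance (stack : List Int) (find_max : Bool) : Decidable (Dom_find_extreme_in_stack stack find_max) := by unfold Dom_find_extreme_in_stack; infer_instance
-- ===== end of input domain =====

-- B replaces A's destructive two-loop pop/compare/push-back with a direct non-mutating max()/min()
-- read (A restores the stack, so only the return value matters; the equivalence is about the return value).


-- ===== PORT A =====
-- the first while-loop: repeatedly stack.pop() (so the elements arrive in reversed order),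
-- updating extreme_value with A's exact compound condition; the second while-loop only
-- restores the stack and does not affect the return value.
def pvLoopA (fm : Bool) : List Int → Option Int → Option Int
  | [], acc => acc
  | e :: rest, acc =>
      let acc' : Option Int :=
        match acc with
        | none => some e
        | some v => if (fm && decide (e > v)) || (!fm && decide (e < v)) then some e else some v
      pvLoopA fm rest acc'

def find_extreme_in_stack (stack : List Int) (find_max : Bool) : Option Int :=
  pvLoopA find_max stack.reverse none

-- ===== PORT B =====
def find_extreme_in_stack_alt (stack : List Int) (find_max : Bool) : Option Int :=
  match stack with
  | [] => none
  | _ :: _ => if find_max then PySem.List.max? stack (fun y => y) else PySem.List.min? stack (fun y => y)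

-- ===== PRECONDITION & SPEC =====
def Spec_find_extreme_in_stack (stack : List Int) (find_max : Bool) (out : Option Int) : Prop := out = find_extreme_in_stack_alt stack find_max
instance (stack : List Int) (find_max : Bool) (out : Option Int) : Decidable (Spec_find_extreme_in_stack stack find_max out) := by unfold Spec_find_extreme_in_stack; infer_instance

-- ===== CLAIM (what is proved, stated in full; the proofs are below) =====
def Claim_equal_find_extreme_in_stack : Prop := ∀ (stack : List Int) (find_max : Bool), Dom_find_extreme_in_stack stack find_max → Spec_find_extreme_in_stack stack find_max (find_extreme_in_stack stack find_max)

-- ===== LEMMAS AND PROOFS =====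

theorem pvLoopA_some_max (l : List Int) (v : Int) :
    pvLoopA true l (some v) = some (l.foldl max v) := by
  induction l generalizing v with
  | nil => rfl
  | cons e rest ih =>
      simp only [pvLoopA, List.foldl_cons]
      rw [show (if (true && decide (e > v)) || (!true && decide (e < v)) then some e else some v)
            = some (max v e) by
          simp only [Bool.true_and, Bool.not_true, Bool.false_and, Bool.or_false, decide_eq_true_eq]
          split_ifs with h <;> simp [max_def] <;> omega]
      exact ih (max v e)

theorem pvLoopA_some_min (l : List Int) (v : Int) :
    pvLoopA false l (some v) = some (l.foldl min v) := by
  induction l generalizing v with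
  | nil => rfl
  | cons e rest ih =>
      simp only [pvLoopA, List.foldl_cons]
      rw [show (if (false && decide (e > v)) || (!false && decide (e < v)) then some e else some v)
            = some (min v e) by
          simp only [Bool.false_and, Bool.not_false, Bool.true_and, Bool.false_or, decide_eq_true_eq]
          split_ifs with h <;> simp [min_def] <;> omega]
      exact ih (min v e)

theorem foldl_max_spec (l : List Int) (a : Int) :
    l.foldl max a ∈ a :: l ∧ ∀ y ∈ a :: l, y ≤ l.foldl max a := by
  induction l generalizing a with
  | nil => simp
  | cons x t ih =>
      obtain ⟨hmem, hbound⟩ := ih (max a x)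
      have hF : List.foldl max a (x :: t) = List.foldl max (max a x) t := rfl
      refine ⟨?_, ?_⟩
      · rw [hF]
        rcases List.mem_cons.mp hmem with h | h
        · rcases max_choice a x with hc | hc
          · exact List.mem_cons.mpr (Or.inl (h.trans hc))
          · exact List.mem_cons.mpr (Or.inr (List.mem_cons.mpr (Or.inl (h.trans hc))))
        · exact List.mem_cons.mpr (Or.inr (List.mem_cons.mpr (Or.inr h)))
      · intro y hy
        rw [hF]
        have hax : max a x ≤ List.foldl max (max a x) t := hbound _ (by simp)
        rcases List.mem_cons.mp hy with h1 | h1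
        · rw [h1]; exact le_trans (le_max_left a x) hax
        · rcases List.mem_cons.mp h1 with h2 | h2
          · rw [h2]; exact le_trans (le_max_right a x) hax
          · exact hbound _ (List.mem_cons.mpr (Or.inr h2))

theorem foldl_min_spec (l : List Int) (a : Int) :
    l.foldl min a ∈ a :: l ∧ ∀ y ∈ a :: l, l.foldl min a ≤ y := by
  induction l generalizing a with
  | nil => simp
  | cons x t ih =>
      obtain ⟨hmem, hbound⟩ := ih (min a x)
      have hF : List.foldl min a (x :: t) = List.foldl min (min a x) t := rfl
      refine ⟨?_, ?_⟩
      · rw [hF]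
        rcases List.mem_cons.mp hmem with h | h
        · rcases min_choice a x with hc | hc
          · exact List.mem_cons.mpr (Or.inl (h.trans hc))
          · exact List.mem_cons.mpr (Or.inr (List.mem_cons.mpr (Or.inl (h.trans hc))))
        · exact List.mem_cons.mpr (Or.inr (List.mem_cons.mpr (Or.inr h)))
      · intro y hy
        rw [hF]
        have hax : List.foldl min (min a x) t ≤ min a x := hbound _ (by simp)
        rcases List.mem_cons.mp hy with h1 | h1
        · rw [h1]; exact le_trans hax (min_le_left a x)
        · rcases List.mem_cons.mp h1 with h2 | h2
          · rw [h2]; exact le_trans hax (min_le_right a x)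
          · exact hbound _ (List.mem_cons.mpr (Or.inr h2))

theorem find_extreme_in_stack_spec : Claim_equal_find_extreme_in_stack := by
  intro stack fm _
  unfold Spec_find_extreme_in_stack
  cases stack with
  | nil => cases fm <;> rfl
  | cons h t =>
      cases hrev : (h :: t).reverse with
      | nil => exact absurd hrev (by simp)
      | cons a r =>
          have hmemiff : ∀ y : Int, y ∈ a :: r ↔ y ∈ h :: t := by
            intro y; rw [← hrev, List.mem_reverse]
          cases fm with
          | true =>
              show pvLoopA true (h :: t).reverse none = _
              rw [hrev]
              have : pvLoopA true (a :: r) none = pvLoopA true r (some a) := rfl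
              rw [this, pvLoopA_some_max]
              simp only [find_extreme_in_stack_alt, if_pos, PySem.List.max?_id_cons]
              obtain ⟨m1mem, m1b⟩ := foldl_max_spec r a
              obtain ⟨m2mem, m2b⟩ := foldl_max_spec t h
              exact congrArg some (le_antisymm
                (m2b _ ((hmemiff _).mp m1mem))
                (m1b _ ((hmemiff _).mpr m2mem)))
          | false =>
              show pvLoopA false (h :: t).reverse none = _
              rw [hrev]
              have : pvLoopA false (a :: r) none = pvLoopA false r (some a) := rfl
              rw [this, pvLoopA_some_min]
              simp only [find_extreme_in_stack_alt, Bool.false_eq_true, PySem.List.min?_id_cons]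
              obtain ⟨m1mem, m1b⟩ := foldl_min_spec r a
              obtain ⟨m2mem, m2b⟩ := foldl_min_spec t h
              exact congrArg some (le_antisymm
                (m1b _ ((hmemiff _).mpr m2mem))
                (m2b _ ((hmemiff _).mp m1mem)))
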